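-- pv_equiv track=rewrite | github.com/NesjaCode/advent-of-code-2021 | python/day_10/part_2.py | get_couple
-- ===== SOURCE A (Python) =====
-- def get_couple(line, chars):
--     for i, element in enumerate(line):
--         counter = 0
--         if chars.index(element) % 2 != 0:
--             for j in range(i, -1, -1):
--                 if line[j] == element:
--                     counter += 1
--                 elif chars.index(line[j]) == chars.index(element) - 1 and counter != 0:
--                     counter -= 1
--                 if chars.index(line[j]) == chars.index(element) - 1 and counter == 0:
--                     return j, i
-- ===== SOURCE B (Python) =====
-- def get_couple(line, chars):
--     last = {}
--     for i, element in enumerate(line):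
--         t = chars.index(element)
--         if t % 2 == 0:
--             last[t] = i
--         else:
--             if t - 1 in last:
--                 return last[t - 1], i
--     return None
-- ===== Notes on version B (the rewrite author's own statement) =====
-- stated objective: faster
-- what changed: Replaces A's O(n^2) backward rescan per closing character by a single forward pass that keeps, for each opener type, the index of its most recent occurrence in a dict, returning at the first closer whose opener type has been seen.
import Mathlib
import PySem

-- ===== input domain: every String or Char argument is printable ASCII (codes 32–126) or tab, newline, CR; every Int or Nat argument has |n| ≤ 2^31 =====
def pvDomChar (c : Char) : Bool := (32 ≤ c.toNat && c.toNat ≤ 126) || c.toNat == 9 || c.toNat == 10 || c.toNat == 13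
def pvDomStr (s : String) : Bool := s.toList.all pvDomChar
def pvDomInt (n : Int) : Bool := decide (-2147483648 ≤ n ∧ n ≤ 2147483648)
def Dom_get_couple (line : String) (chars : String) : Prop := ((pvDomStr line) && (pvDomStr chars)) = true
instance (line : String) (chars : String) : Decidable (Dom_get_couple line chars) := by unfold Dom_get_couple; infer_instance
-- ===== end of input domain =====

-- B replaces A's quadratic backward rescans by one forward pass keeping, per opener type,
-- the index of its most recent occurrence (equality of RETURN values; neither version mutates).

-- chars.index(c); the ValueError case (c ∉ chars) is excluded by Pre_get_couple, default 0 is junk there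
def gcIx (cs : List Char) (c : Char) : Int := (((PySem.List.index? cs c).getD 0 : Nat) : Int)

-- line[j] for a Nat index j (always in range where the loops read it)
def gcAt (l : List Char) (j : Nat) : Char := PySem.List.pyGetD l (j : Int) ' '

-- ===== PORT A =====
-- inner loop 'for j in range(i, -1, -1)', counter threaded; recursion j+1 → j mirrors the countdown
def gcInner (l cs : List Char) (element : Char) (eIx : Int) (i : Nat) : Nat → Int → Option (Int × Int)
  | j, counter =>
    let c := gcAt l j
    let counter2 :=
      if c = element then counter + 1
      else if gcIx cs c = eIx - 1 ∧ counter ≠ 0 then counter - 1 else counter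
    if gcIx cs c = eIx - 1 ∧ counter2 = 0 then some ((j : Int), (i : Int))
    else
      match j with
      | 0 => none
      | Nat.succ j' => gcInner l cs element eIx i j' counter2

-- outer loop 'for i, element in enumerate(line)'
def gcOuter (l cs : List Char) : Nat → List Char → Option (Int × Int)
  | _, [] => none
  | i, element :: rest =>
    if PySem.Int.mod (gcIx cs element) 2 ≠ 0 then
      match gcInner l cs element (gcIx cs element) i i 0 with
      | some r => some r
      | none => gcOuter l cs (i + 1) rest
    else gcOuter l cs (i + 1) rest

def get_couple (line : String) (chars : String) : Option (Int × Int) :=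
  gcOuter line.toList chars.toList 0 line.toList

-- ===== PORT B =====
-- single forward pass; 'last' maps each even type (opener) to the index of its latest occurrence
def gcAltLoop (cs : List Char) : Nat → PySem.Dict Int Int → List Char → Option (Int × Int)
  | _, _, [] => none
  | i, last, element :: rest =>
    let t := gcIx cs element
    if PySem.Int.mod t 2 = 0 then gcAltLoop cs (i + 1) (last.insert t (i : Int)) rest
    else
      match last.get? (t - 1) with
      | some j => some (j, (i : Int))
      | none => gcAltLoop cs (i + 1) last rest

def get_couple_alt (line : String) (chars : String) : Option (Int × Int) :=
  gcAltLoop chars.toList 0 PySem.Dict.empty line.toList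

-- ===== PRECONDITION & SPEC =====
-- Pre_ excludes exactly the inputs where Python raises ValueError (chars.index of a character
-- of line that is not in chars, reached before any return): A returns normally iff every
-- character of line is in chars, or some closer with a matching earlier opener occurs with a
-- fully in-alphabet prefix (A then returns before reaching the offending character).
def Pre_get_couple (line : String) (chars : String) : Prop :=
  (line.toList.all (fun c => chars.toList.contains c)
   || (List.range line.toList.length).any (fun i =>
        ((List.range (i + 1)).all (fun m => chars.toList.contains (gcAt line.toList m)))
        && !(PySem.Int.mod (gcIx chars.toList (gcAt line.toList i)) 2 == 0)
        && ((List.range i).any (fun j =>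
              gcIx chars.toList (gcAt line.toList j)
                == gcIx chars.toList (gcAt line.toList i) - 1)))) = true
instance (line : String) (chars : String) : Decidable (Pre_get_couple line chars) := by
  unfold Pre_get_couple; infer_instance

def pvWitness_get_couple : String × String := ("()", "()")

def Spec_get_couple (line : String) (chars : String) (out : Option (Int × Int)) : Prop := out = get_couple_alt line chars
instance (line : String) (chars : String) (out : Option (Int × Int)) : Decidable (Spec_get_couple line chars out) := by unfold Spec_get_couple; infer_instance

-- ===== CLAIM (what is proved, stated in full; the proofs are below) =====
def Claim_equal_get_couple : Prop := ∀ (line : String) (chars : String), Dom_get_couple line chars → Pre_get_couple line chars → Spec_get_couple line chars (get_couple line chars)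

-- ===== LEMMAS AND PROOFS =====

lemma gcIx_nonneg (cs : List Char) (c : Char) : 0 ≤ gcIx cs c := Int.natCast_nonneg _

lemma gcMod (t : Int) : PySem.Int.mod t 2 = t % 2 :=
  PySem.Int.mod_eq_emod_of_pos (by norm_num)

-- the index of the latest occurrence before position k of a character of type v
def lastOcc (l cs : List Char) (k : Nat) (v : Int) : Option Nat :=
  ((List.range k).filter (fun j => gcIx cs (gcAt l j) = v)).getLast?

lemma lastOcc_zero (l cs : List Char) (v : Int) : lastOcc l cs 0 v = none := rfl

lemma lastOcc_succ (l cs : List Char) (k : Nat) (v : Int) :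
    lastOcc l cs (k + 1) v =
      if gcIx cs (gcAt l k) = v then some k else lastOcc l cs k v := by
  unfold lastOcc
  rw [List.range_succ, List.filter_append]
  by_cases h : gcIx cs (gcAt l k) = v
  · rw [if_pos h]
    have h1 : List.filter (fun j => decide (gcIx cs (gcAt l j) = v)) [k] = [k] := by
      simp only [List.filter_singleton]
      rw [decide_eq_true h, cond_true]
    rw [h1, List.getLast?_concat]
  · rw [if_neg h]
    have h1 : List.filter (fun j => decide (gcIx cs (gcAt l j) = v)) [k] = [] := by
      simp only [List.filter_singleton]
      rw [decide_eq_false h, cond_false]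
    rw [h1, List.append_nil]

lemma lastOcc_none (l cs : List Char) {k : Nat} {v : Int}
    (h : lastOcc l cs k v = none) :
    ∀ j < k, gcIx cs (gcAt l j) ≠ v := by
  intro j hj hv
  unfold lastOcc at h
  rw [List.getLast?_eq_none_iff, List.filter_eq_nil_iff] at h
  exact h j (List.mem_range.mpr hj) (by simpa using hv)

lemma lastOcc_some (l cs : List Char) {k j : Nat} {v : Int}
    (h : lastOcc l cs k v = some j) :
    j < k ∧ gcIx cs (gcAt l j) = v ∧
      ∀ m, j < m → m < k → gcIx cs (gcAt l m) ≠ v := by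
  unfold lastOcc at h
  obtain ⟨l', hl'⟩ := List.getLast?_eq_some_iff.mp h
  have hmem : j ∈ (List.range k).filter (fun j => gcIx cs (gcAt l j) = v) := by
    rw [hl']; exact List.mem_append.mpr (Or.inr (by simp))
  have hj : j < k ∧ gcIx cs (gcAt l j) = v := by
    simpa [List.mem_filter, List.mem_range] using hmem
  refine ⟨hj.1, hj.2, ?_⟩
  intro m hjm hmk hv
  have hmmem : m ∈ (List.range k).filter (fun j => gcIx cs (gcAt l j) = v) := by
    simp only [List.mem_filter, List.mem_range]
    exact ⟨hmk, by simpa using hv⟩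
  have hpair : ((List.range k).filter (fun j => gcIx cs (gcAt l j) = v)).Pairwise (· < ·) :=
    List.Pairwise.filter _ (List.pairwise_lt_range)
  rw [hl'] at hmmem hpair
  rcases List.mem_append.mp hmmem with hm | hm
  · have := (List.pairwise_append.mp hpair).2.2 m hm j (by simp)
    omega
  · have : m = j := by simpa using hm
    omega

-- A's backward scan returns none when no matching opener type occurs at or below j
lemma innerNone (l cs : List Char) (element : Char) (eIx : Int) (i : Nat) :
    ∀ j, (∀ m, m ≤ j → gcIx cs (gcAt l m) ≠ eIx - 1) →
    ∀ counter, gcInner l cs element eIx i j counter = none := by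
  intro j
  induction j with
  | zero =>
      intro h counter
      simp only [gcInner]
      simp [h 0 (le_refl 0)]
  | succ j' ih =>
      intro h counter
      simp only [gcInner]
      simp only [h (j' + 1) (le_refl _), false_and, if_false]
      exact ih (fun m hm => h m (by omega)) _

-- A's backward scan, entered with counter 1, finds the latest matching opener jmax
lemma innerFind (l cs : List Char) (element : Char) (eIx : Int) (i : Nat)
    (helem : gcIx cs element = eIx) (jmax : Nat)
    (hjm : gcIx cs (gcAt l jmax) = eIx - 1) :
    ∀ j, jmax ≤ j →
    (∀ m, jmax < m → m ≤ j → gcAt l m ≠ element ∧ gcIx cs (gcAt l m) ≠ eIx - 1) →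
    gcInner l cs element eIx i j 1 = some ((jmax : Int), (i : Int)) := by
  have hne : gcAt l jmax ≠ element := by
    intro h; rw [h, helem] at hjm; omega
  intro j
  induction j with
  | zero =>
      intro hle _
      have hz : jmax = 0 := by omega
      subst hz
      simp only [gcInner]
      simp [hne, hjm]
  | succ j' ih =>
      intro hle hmid
      by_cases hj : jmax = j' + 1
      · subst hj
        simp only [gcInner]
        simp [hne, hjm]
      · have hle' : jmax ≤ j' := by omega
        obtain ⟨h1, h2⟩ := hmid (j' + 1) (by omega) (le_refl _)
        simp only [gcInner]
        simp only [h1, if_false, h2, false_and, if_false]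
        exact ih hle' (fun m hm hm' => hmid m hm (by omega))

-- main loop correspondence: A's remaining outer loop equals B's remaining pass, given that
-- no closer before k had a matching opener and that the dict holds the latest even-type indices
lemma outerMain (l cs : List Char) :
    ∀ (rest : List Char) (k : Nat) (d : PySem.Dict Int Int),
      rest = l.drop k →
      (∀ i', i' < k →
        ¬ (PySem.Int.mod (gcIx cs (gcAt l i')) 2 ≠ 0 ∧
           ∃ j < i', gcIx cs (gcAt l j) = gcIx cs (gcAt l i') - 1)) →
      (∀ v : Int, PySem.Int.mod v 2 = 0 →
        d.get? v = Option.map Int.ofNat (lastOcc l cs k v)) →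
      gcOuter l cs k rest = gcAltLoop cs k d rest := by
  intro rest
  induction rest with
  | nil => intro k d _ _ _; rfl
  | cons e rest' ih =>
      intro k d hdrop h1 hd
      have hgk : l[k]? = some e := by
        have h2 : (List.drop k l)[0]? = some e := by rw [← hdrop]; rfl
        rw [List.getElem?_drop] at h2; simpa using h2
      have hke : gcAt l k = e := by
        have hk : k < l.length := by
          by_contra hcon
          rw [List.getElem?_eq_none (by omega)] at hgk; cases hgk
        simp [gcAt, List.getD, hgk]
      have hdrop' : rest' = l.drop (k + 1) := by
        have h2 : l.drop (k + 1) = (l.drop k).drop 1 := by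
          rw [List.drop_drop]
        rw [h2, ← hdrop]; rfl
      have h0 : (0 : Int) ≤ gcIx cs e := gcIx_nonneg cs e
      by_cases heven : PySem.Int.mod (gcIx cs e) 2 = 0
      · -- opener (or junk type 0): A skips, B records the index
        simp only [gcOuter, gcAltLoop]
        rw [if_neg (not_not_intro heven), if_pos heven]
        apply ih (k + 1) _ hdrop'
        · intro i' hi'
          by_cases hik : i' = k
          · subst hik; rw [hke]; intro hcon; exact hcon.1 heven
          · exact h1 i' (by omega)
        · intro v hv
          rw [PySem.Dict.get?_insert, lastOcc_succ, hke]
          by_cases hvt : gcIx cs e = v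
          · rw [if_pos (hvt.symm), if_pos hvt]; rfl
          · rw [if_neg (fun h => hvt h.symm), if_neg hvt]
            exact hd v hv
      · -- closer: A scans backwards, B looks up the latest matching opener
        have hodd1 : PySem.Int.mod (gcIx cs e - 1) 2 = 0 := by
          rw [gcMod] at heven ⊢; omega
        have hb := hd (gcIx cs e - 1) hodd1
        simp only [gcOuter, gcAltLoop]
        rw [if_pos heven, if_neg heven, hb]
        cases hlo : lastOcc l cs k (gcIx cs e - 1) with
        | some jmax =>
            obtain ⟨hjk, hjv, hjmax⟩ := lastOcc_some l cs hlo
            have hstep : gcInner l cs e (gcIx cs e) k k 0 = some ((jmax : Int), (k : Int)) := by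
              obtain ⟨k', rfl⟩ : ∃ k', k = k' + 1 := ⟨k - 1, by omega⟩
              simp only [gcInner]
              rw [hke]
              rw [if_pos (rfl : e = e)]
              rw [if_neg (by intro hcon; omega)]
              apply innerFind l cs e (gcIx cs e) (k' + 1) rfl jmax hjv k' (by omega)
              intro m hm hm'
              refine ⟨?_, hjmax m hm (by omega)⟩
              intro hme
              apply h1 m (by omega)
              rw [hme]
              exact ⟨heven, ⟨jmax, by omega, hjv⟩⟩
            rw [hstep]
            rfl
        | none =>
            have hnone := lastOcc_none l cs hlo
            have hinner : gcInner l cs e (gcIx cs e) k k 0 = none := by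
              apply innerNone
              intro m hm
              by_cases hmk : m = k
              · subst hmk; rw [hke]; omega
              · exact hnone m (by omega)
            rw [hinner]
            apply ih (k + 1) d hdrop'
            · intro i' hi'
              by_cases hik : i' = k
              · subst hik; rw [hke]
                rintro ⟨-, j, hj, hjv⟩
                exact hnone j hj hjv
              · exact h1 i' (by omega)
            · intro v hv
              rw [lastOcc_succ, hke, if_neg, hd v hv]
              intro hcon
              rw [hcon] at heven
              exact heven hv

-- ===== VERDICT (by name: the statement is the Claim_ definition above) =====
theorem get_couple_spec : Claim_equal_get_couple := by
  intro line chars _ _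
  unfold Spec_get_couple get_couple get_couple_alt
  apply outerMain line.toList chars.toList line.toList 0 PySem.Dict.empty rfl
  · intro i' hi'; omega
  · intro v _
    rw [lastOcc_zero]
    simp [PySem.Dict.get?_empty]
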